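-- pv_equiv track=rewrite | github.com/Riis-KIM/SSAFY-Algorithm | 0817/최고급붕어빵.py | bunge
-- ===== SOURCE A (Python) =====
-- def bunge(M, K, people):
--     # 초, 빵 , 사람
--     i = -1
--     bread = 0
--     j = 0
--     while j < len(people):
--         i += 1
--         # 제작 시간에 맞춰 빵 제작, 0초일때는 방금 장사를 시작해서 빵을 준비할 수가 없음
--         if i % M == 0 and i != 0:
--             bread += K
--         # 사람 도착
--         if people[j] <= i:
--             # 빵이 남아 있다면 주고 다음 손님 생각
--             if bread > 0:
--                 bread -= 1
--                 j += 1
--             else: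
--                 return 'Impossible'
--     return 'Possible'
-- ===== SOURCE B (Python) =====
-- def bunge(M, K, people):
--     # O(n): the j-th customer is served at second t_j = max(arrival_j, t_{j-1}+1);
--     # the bread baked by then is floor(t_j/M)*K, of which j were already handed out.
--     t = -1
--     for j, a in enumerate(people):
--         t = max(a, t + 1)
--         if (t // M) * K <= j:
--             return 'Impossible'
--     return 'Possible'
-- ===== Notes on version B (the rewrite author's own statement) =====
-- stated objective: faster
-- what changed: Instead of simulating every second one by one, B computes each customer's serving second directly as t_j = max(arrival_j, t_{j-1}+1) and checks floor(t_j/M)*K > j, one O(1) step per customer; Pre_ restricts to positive baking intervals M >= 1 (M = 0 makes A raise ZeroDivisionError, and a non-positive interval is outside the task's natural domain, where A's Python-modulo baking schedule is accidental).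
-- outside the precondition, e.g. on bunge(-2, 5, [2]): A returns 'Possible', B returns 'Impossible'; on bunge(0, 1, [0]): A raises ZeroDivisionError, B raises ZeroDivisionError
import Mathlib
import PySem

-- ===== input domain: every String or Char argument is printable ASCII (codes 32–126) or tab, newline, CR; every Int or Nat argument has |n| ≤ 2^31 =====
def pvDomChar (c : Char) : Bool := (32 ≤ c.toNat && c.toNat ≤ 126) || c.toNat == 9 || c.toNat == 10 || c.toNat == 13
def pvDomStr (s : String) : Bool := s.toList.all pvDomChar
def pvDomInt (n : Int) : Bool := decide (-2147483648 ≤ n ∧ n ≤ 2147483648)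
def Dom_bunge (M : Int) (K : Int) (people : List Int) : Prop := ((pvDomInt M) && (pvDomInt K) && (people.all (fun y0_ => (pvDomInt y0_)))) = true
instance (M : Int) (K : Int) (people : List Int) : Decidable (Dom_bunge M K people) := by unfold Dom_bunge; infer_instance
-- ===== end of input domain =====

-- B replaces A's second-by-second simulation by one O(1) step per customer.

-- ===== PORT A =====
-- A's 'if i % M == 0 and i != 0: bread += K' (the stock after the bake of second i')
def bungeStock (M : Int) (K : Int) (i' : Int) (bread : Int) : Int :=
  if PySem.Int.mod i' M = 0 ∧ i' ≠ 0 then bread + K else bread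

-- Literal port of A's while loop: i counts seconds, bread the stock, j the next customer.
-- Terminates: each step either serves a customer (j grows) or, with j fixed,
-- people[j] > i+1 so the gap people[j] - i shrinks.
def bungeLoop (M : Int) (K : Int) (people : List Int) (i bread : Int) (j : Nat) : String :=
  if h : j < people.length then
    if people[j] ≤ i + 1 then
      if bungeStock M K (i + 1) bread > 0 then
        bungeLoop M K people (i + 1) (bungeStock M K (i + 1) bread - 1) (j + 1)
      else "Impossible"
    else bungeLoop M K people (i + 1) (bungeStock M K (i + 1) bread) j
  else "Possible"
termination_by (people.length - j, (people[j]! - i).toNat)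
decreasing_by
  · exact Prod.Lex.left _ _ (by omega)
  · rename_i hnle
    apply Prod.Lex.right
    have hbang : people[j]! = people[j] := getElem!_pos people j h
    simp only [hbang]
    omega

def bunge (M : Int) (K : Int) (people : List Int) : String :=
  bungeLoop M K people (-1) 0 0

-- ===== PORT B =====
-- Port of Source B: one step per customer, carrying the serving second t and index j.
def bungeAltGo (M : Int) (K : Int) (j : Int) (t : Int) : List Int → String
  | [] => "Possible"
  | a :: rest =>
    if PySem.Int.floordiv (max a (t + 1)) M * K ≤ j then "Impossible"
    else bungeAltGo M K (j + 1) (max a (t + 1)) rest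

def bunge_alt (M : Int) (K : Int) (people : List Int) : String :=
  bungeAltGo M K 0 (-1) people

-- ===== PRECONDITION & SPEC =====
-- Pre_ restricts to positive baking intervals M ≥ 1, the task's natural domain:
-- M = 0 makes A raise ZeroDivisionError on any nonempty people, and on negative M
-- A's baking schedule (Python's i % M == 0) is an accident of its implementation.
def Pre_bunge (M : Int) (K : Int) (people : List Int) : Prop := 1 ≤ M
instance (M : Int) (K : Int) (people : List Int) : Decidable (Pre_bunge M K people) := by unfold Pre_bunge; infer_instance
def pvWitness_bunge : Int × Int × List Int := (2, 1, [0, 2, 3])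
def Spec_bunge (M : Int) (K : Int) (people : List Int) (out : String) : Prop := out = bunge_alt M K people
instance (M : Int) (K : Int) (people : List Int) (out : String) : Decidable (Spec_bunge M K people out) := by unfold Spec_bunge; infer_instance

-- ===== CLAIM (what is proved, stated in full; the proofs are below) =====
def Claim_equal_bunge : Prop := ∀ (M : Int) (K : Int) (people : List Int), Dom_bunge M K people → Pre_bunge M K people → Spec_bunge M K people (bunge M K people)

-- ===== LEMMAS AND PROOFS =====

-- cumulative bread baked by the end of second i (0 for i ≤ -1: nothing baked yet)
def pvProd (M : Int) (K : Int) (i : Int) : Int :=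
  if i ≤ -1 then 0 else PySem.Int.floordiv i M * K

lemma pvProd_step (M : Int) (K : Int) (i : Int) (hM : 0 < M) (hi : -1 ≤ i) (bread : Int)
    (hb : bread = pvProd M K i) : bungeStock M K (i + 1) bread = pvProd M K (i + 1) := by
  have hdvd : PySem.Int.mod (i + 1) M = 0 ↔ M ∣ (i + 1) :=
    PySem.Int.mod_eq_zero_iff_dvd _ _
  subst hb
  rcases eq_or_lt_of_le hi with h | h
  · -- i = -1 : stock stays 0 (the 'i ≠ 0' guard suppresses a bake at second 0)
    simp [bungeStock, pvProd, ← h, PySem.Int.floordiv_eq_ediv_of_pos hM]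
  · have hi0 : 0 ≤ i := by omega
    have hr0 : 0 ≤ i % M := Int.emod_nonneg i (by omega)
    have hrm : i % M < M := Int.emod_lt_of_pos i hM
    have hieq : M * (i / M) + i % M = i := Int.mul_ediv_add_emod i M
    by_cases hd : i % M + 1 = M
    · -- second i+1 is a baking second
      have heq : i + 1 = M * (i / M + 1) := by
        have : M * (i / M + 1) = M * (i / M) + M := by ring
        linarith
      have hdv : M ∣ i + 1 := ⟨i / M + 1, heq⟩
      have hdiv1 : (i + 1) / M = i / M + 1 := by
        rw [heq, Int.mul_ediv_cancel_left _ (by omega : M ≠ 0)]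
      simp only [bungeStock, pvProd, if_neg (by omega : ¬ i + 1 ≤ -1),
        if_neg (by omega : ¬ i ≤ -1), PySem.Int.floordiv_eq_ediv_of_pos hM, hdvd,
        if_pos (⟨hdv, by omega⟩ : M ∣ i + 1 ∧ i + 1 ≠ 0), hdiv1]
      ring
    · -- not a baking second
      have hur : (i + 1) / M = i / M ∧ (i + 1) % M = i % M + 1 :=
        (Int.ediv_emod_unique'' (by omega : M ≠ 0)).mpr
          ⟨by linarith, by omega, by rw [abs_of_pos hM]; omega⟩
      have hdv : ¬ M ∣ i + 1 := by
        intro hdd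
        have hz := Int.emod_eq_zero_of_dvd hdd
        omega
      simp only [bungeStock, pvProd, if_neg (by omega : ¬ i + 1 ≤ -1),
        if_neg (by omega : ¬ i ≤ -1), PySem.Int.floordiv_eq_ediv_of_pos hM, hdvd,
        if_neg (by tauto : ¬ (M ∣ i + 1 ∧ i + 1 ≠ 0)), hur.1]

-- Main loop correspondence: from any loop state satisfying the bread invariant
-- bread = (total baked by second i) - (customers served so far), A's simulation
-- equals B's per-customer loop on the remaining customers.
lemma bungeLoop_eq (M K : Int) (people : List Int) (hM : 0 < M) :
    ∀ (i bread : Int) (j : Nat), bread = pvProd M K i - (j : Int) → -1 ≤ i →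
      bungeLoop M K people i bread j = bungeAltGo M K (j : Int) i (people.drop j) := by
  intro i bread j
  induction i, bread, j using bungeLoop.induct M K people with
  | case1 i bread j h hle hpos ih =>
    intro hinv hi
    have hb' : bungeStock M K (i + 1) bread = pvProd M K (i + 1) - (j : Int) := by
      have := pvProd_step M K i hM hi (bread + (j : Int)) (by omega)
      simp only [bungeStock] at this ⊢
      split at this <;> split <;> omega
    have ht' : max people[j] (i + 1) = i + 1 := by omega
    have hprod : pvProd M K (i + 1) = PySem.Int.floordiv (i + 1) M * K := by
      unfold pvProd; rw [if_neg (by omega)]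
    rw [bungeLoop, dif_pos h, if_pos hle, if_pos hpos,
      List.drop_eq_getElem_cons h, bungeAltGo, ht',
      if_neg (show ¬ PySem.Int.floordiv (i + 1) M * K ≤ (j : Int) by rw [← hprod]; omega)]
    rw [ih (by rw [hb']; push_cast; ring) (by omega)]
    norm_cast
  | case2 i bread j h hle hpos =>
    intro hinv hi
    have hb' : bungeStock M K (i + 1) bread = pvProd M K (i + 1) - (j : Int) := by
      have := pvProd_step M K i hM hi (bread + (j : Int)) (by omega)
      simp only [bungeStock] at this ⊢
      split at this <;> split <;> omega
    have ht' : max people[j] (i + 1) = i + 1 := by omega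
    have hprod : pvProd M K (i + 1) = PySem.Int.floordiv (i + 1) M * K := by
      unfold pvProd; rw [if_neg (by omega)]
    rw [bungeLoop, dif_pos h, if_pos hle, if_neg hpos,
      List.drop_eq_getElem_cons h, bungeAltGo, ht',
      if_pos (show PySem.Int.floordiv (i + 1) M * K ≤ (j : Int) by rw [← hprod]; omega)]
  | case3 i bread j h hle ih =>
    intro hinv hi
    have hb' : bungeStock M K (i + 1) bread = pvProd M K (i + 1) - (j : Int) := by
      have := pvProd_step M K i hM hi (bread + (j : Int)) (by omega)
      simp only [bungeStock] at this ⊢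
      split at this <;> split <;> omega
    rw [bungeLoop, dif_pos h, if_neg hle, ih hb' (by omega),
      List.drop_eq_getElem_cons h, bungeAltGo, bungeAltGo,
      show max people[j] (i + 1 + 1) = max people[j] (i + 1) by omega]
  | case4 i bread j h =>
    intro _ _
    rw [bungeLoop, dif_neg h, List.drop_eq_nil_of_le (by omega), bungeAltGo]

-- ===== VERDICT (by name: the statement is the Claim_ definition above) =====
theorem bunge_spec : Claim_equal_bunge := by
  intro M K people _ hpre
  unfold Spec_bunge bunge bunge_alt
  simpa using bungeLoop_eq M K people (by exact hpre) (-1) 0 0 (by simp [pvProd]) (by omega)
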